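-- pv_equiv track=rewrite | github.com/BBC-Esq/Huggingface_Client | hf_backend/hf_model_card.py | _yaml_quote
-- ===== SOURCE A (Python) =====
-- _YAML_SPECIAL = set(':{}[],"\'|>&*!#%@`\n\r')
--
-- _YAML_BOOLS = {'true', 'false', 'yes', 'no', 'null', 'on', 'off'}
--
-- def _yaml_quote(value: str) -> str:
--     if not value:
--         return '""'
--     if (any(ch in _YAML_SPECIAL for ch in value)
--             or value.strip() != value
--             or value.lower() in _YAML_BOOLS):
--         escaped = value.replace('\\', '\\\\').replace('"', '\\"')
--         escaped = escaped.replace('\n', '\\n').replace('\r', '\\r')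
--         return f'"{escaped}"'
--     return value
-- ===== SOURCE B (Python) =====
-- _YAML_SPECIAL = set(':{}[],"\'|>&*!#%@`\n\r')
--
-- _YAML_BOOLS = {'true', 'false', 'yes', 'no', 'null', 'on', 'off'}
--
-- _ESC = {'\\': '\\\\', '"': '\\"', '\n': '\\n', '\r': '\\r'}
--
-- def _yaml_quote(value: str) -> str:
--     needs_quote = value.strip() != value or value.lower() in _YAML_BOOLS
--     out = []
--     for ch in value:
--         if ch in _YAML_SPECIAL:
--             needs_quote = True
--         out.append(_ESC.get(ch, ch))
--     if not value:
--         return '""'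
--     if needs_quote:
--         return '"' + ''.join(out) + '"'
--     return value
-- ===== Notes on version B (the rewrite author's own statement) =====
-- stated objective: alternative
-- what changed: Single pass over the characters maintaining a needs-quote flag and per-character escaped output, replacing A's separate any()-scan plus four whole-string replace passes.
import Mathlib
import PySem

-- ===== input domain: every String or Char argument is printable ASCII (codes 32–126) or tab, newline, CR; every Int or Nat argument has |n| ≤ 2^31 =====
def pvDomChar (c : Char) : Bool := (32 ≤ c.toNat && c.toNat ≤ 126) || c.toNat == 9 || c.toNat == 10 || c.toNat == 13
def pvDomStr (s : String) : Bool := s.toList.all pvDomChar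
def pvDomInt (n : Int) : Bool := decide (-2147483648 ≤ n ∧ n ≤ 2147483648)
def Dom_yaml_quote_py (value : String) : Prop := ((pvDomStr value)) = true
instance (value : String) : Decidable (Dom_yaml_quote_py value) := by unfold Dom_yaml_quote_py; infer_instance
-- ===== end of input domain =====

-- B does the same job in ONE pass over the characters (flag + per-char escape map) instead of A's
-- separate any() scan plus four whole-string replace passes; same O(n) cost, different decomposition.

-- ===== PORT A =====
def yamlSpecial : List Char :=
  [':', '{', '}', '[', ']', ',', '"', '\'', '|', '>', '&', '*', '!', '#', '%', '@', '`', '\n', '\r']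

def yamlBools : List (List Char) :=
  ["true", "false", "yes", "no", "null", "on", "off"].map String.toList

def yaml_quote_py (value : String) : String :=
  let cs := value.toList
  if cs = [] then "\"\""
  else if cs.any (fun ch => yamlSpecial.contains ch)
        || !(PySem.Chars.strip cs == cs)
        || yamlBools.contains (PySem.Chars.lower cs) then
    let e1 := PySem.Chars.replace cs ['\\'] ['\\', '\\']
    let e2 := PySem.Chars.replace e1 ['"'] ['\\', '"']
    let e3 := PySem.Chars.replace e2 ['\n'] ['\\', 'n']
    let e4 := PySem.Chars.replace e3 ['\r'] ['\\', 'r']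
    String.ofList ('"' :: e4 ++ ['"'])
  else value

-- ===== PORT B =====
def escChar (c : Char) : List Char :=
  if c = '\\' then ['\\', '\\']
  else if c = '"' then ['\\', '"']
  else if c = '\n' then ['\\', 'n']
  else if c = '\r' then ['\\', 'r']
  else [c]

def yaml_quote_py_alt (value : String) : String :=
  let cs := value.toList
  let seed := !(PySem.Chars.strip cs == cs) || yamlBools.contains (PySem.Chars.lower cs)
  let st := cs.foldl
    (fun (st : Bool × List Char) c =>
      (st.1 || yamlSpecial.contains c, st.2 ++ escChar c)) (seed, [])
  if cs = [] then "\"\""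
  else if st.1 then String.ofList ('"' :: st.2 ++ ['"'])
  else value

-- ===== PRECONDITION & SPEC =====
def Spec_yaml_quote_py (value : String) (out : String) : Prop := out = yaml_quote_py_alt value
instance (value : String) (out : String) : Decidable (Spec_yaml_quote_py value out) := by unfold Spec_yaml_quote_py; infer_instance

-- ===== CLAIM (what is proved, stated in full; the proofs are below) =====
def Claim_equal_yaml_quote_py : Prop := ∀ (value : String), Dom_yaml_quote_py value → Spec_yaml_quote_py value (yaml_quote_py value)

-- ===== LEMMAS AND PROOFS =====

-- B's loop: the flag is the seed OR-ed with the any()-scan, the output is flatMap of the escape map.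
theorem fold_escChar (cs : List Char) : ∀ (b : Bool) (acc : List Char),
    cs.foldl (fun (st : Bool × List Char) c =>
      (st.1 || yamlSpecial.contains c, st.2 ++ escChar c)) (b, acc)
    = (b || cs.any (fun ch => yamlSpecial.contains ch), acc ++ cs.flatMap escChar) := by
  induction cs with
  | nil => simp
  | cons c t ih =>
    intro b acc
    rw [List.foldl_cons, ih]
    simp [Bool.or_assoc]

-- str.replace with a single-character pattern is flatMap of a per-char substitution.
theorem replace_go_single (a : Char) (new : List Char) : ∀ (l : List Char) (fuel : Nat) (acc : List Char),
    l.length ≤ fuel →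
    PySem.Chars.replace.go [a] new fuel l acc
      = acc.reverse ++ l.flatMap (fun c => if c = a then new else [c]) := by
  intro l
  induction l with
  | nil =>
    intro fuel acc _
    cases fuel <;> simp [PySem.Chars.replace.go]
  | cons c t ih =>
    intro fuel acc h
    cases fuel with
    | zero => simp at h
    | succ f =>
      simp only [PySem.Chars.replace.go]
      by_cases hc : c = a
      · subst hc
        have : List.isPrefixOf [c] (c :: t) = true := by
          simp [List.isPrefixOf]
        rw [if_pos this]
        have := ih f (new.reverse ++ acc) (by simpa using Nat.le_of_succ_le_succ h)
        simpa using this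
      · have hpre : List.isPrefixOf [a] (c :: t) = false := by
          simp [List.isPrefixOf]
          exact fun hh => (hc hh.symm).elim
        rw [if_neg (by simp [hpre])]
        have := ih f (c :: acc) (by simpa using Nat.le_of_succ_le_succ h)
        simp [this, hc]

theorem replace_single (a : Char) (new : List Char) (l : List Char) :
    PySem.Chars.replace l [a] new = l.flatMap (fun c => if c = a then new else [c]) := by
  simp only [PySem.Chars.replace, List.isEmpty]
  rw [if_neg (by simp)]
  simpa using replace_go_single a new l l.length [] (le_refl _)

-- The four chained single-char replaces collapse to one pass of escChar.
theorem replace_chain (cs : List Char) :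
    PySem.Chars.replace
      (PySem.Chars.replace
        (PySem.Chars.replace
          (PySem.Chars.replace cs ['\\'] ['\\', '\\'])
          ['"'] ['\\', '"'])
        ['\n'] ['\\', 'n'])
      ['\r'] ['\\', 'r']
    = cs.flatMap escChar := by
  simp only [replace_single, List.flatMap_assoc]
  apply List.flatMap_congr
  intro c _
  by_cases h1 : c = '\\'
  · subst h1; decide
  · by_cases h2 : c = '"'
    · subst h2; decide
    · by_cases h3 : c = '\n'
      · subst h3; decide
      · by_cases h4 : c = '\r'
        · subst h4; decide
        · simp [escChar, h1, h2, h3, h4]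

-- ===== VERDICT (by name: the statement is the Claim_ definition above) =====
theorem yaml_quote_py_spec : Claim_equal_yaml_quote_py := by
  intro value _
  unfold Spec_yaml_quote_py yaml_quote_py yaml_quote_py_alt
  simp only [fold_escChar]
  by_cases hnil : value.toList = []
  · simp [hnil]
  · rw [if_neg hnil, if_neg hnil, replace_chain]
    cases hs : (PySem.Chars.strip value.toList == value.toList) <;>
      cases hb : yamlBools.contains (PySem.Chars.lower value.toList) <;>
        cases ha : value.toList.any (fun ch => yamlSpecial.contains ch) <;>
          simp
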